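-- pv_equiv track=rewrite | github.com/bytedo/ClashRule | check_list.py | needs_prefix
-- ===== SOURCE A (Python) =====
-- RULE_TYPES = ["DOMAIN", "DOMAIN-SUFFIX", "DOMAIN-KEYWORD", "IP-CIDR", "GEOIP"]
--
-- def needs_prefix(stripped_line):
--     stripped = stripped_line.strip()
--     if not stripped or stripped.startswith("#"):
--         return False
--     for prefix in RULE_TYPES:
--         if stripped.upper().startswith(prefix + ","):
--             return False
--     return True
-- ===== SOURCE B (Python) =====
-- RULE_TYPES = ["DOMAIN", "DOMAIN-SUFFIX", "DOMAIN-KEYWORD", "IP-CIDR", "GEOIP"]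
--
-- def needs_prefix(stripped_line):
--     stripped = stripped_line.strip()
--     if not stripped or stripped[0] == "#":
--         return False
--     # Parallel candidate-filtering scan (NFA-style): walk the line once,
--     # narrowing the set of still-matching patterns character by character.
--     cands = [w + "," for w in RULE_TYPES]
--     for ch in stripped.upper():
--         cands = [c[1:] for c in cands if c and c[0] == ch]
--         if any(c == "" for c in cands):
--             return False
--         if not cands:
--             return True
--     return True
-- ===== Notes on version B (the rewrite author's own statement) =====
-- stated objective: alternative
-- what changed: Instead of testing each of the five rule-type prefixes with startswith, B does one NFA-style left-to-right scan of the line, maintaining a shrinking set of still-matching candidate suffixes and exiting as soon as a pattern completes or the set empties.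
import Mathlib
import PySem

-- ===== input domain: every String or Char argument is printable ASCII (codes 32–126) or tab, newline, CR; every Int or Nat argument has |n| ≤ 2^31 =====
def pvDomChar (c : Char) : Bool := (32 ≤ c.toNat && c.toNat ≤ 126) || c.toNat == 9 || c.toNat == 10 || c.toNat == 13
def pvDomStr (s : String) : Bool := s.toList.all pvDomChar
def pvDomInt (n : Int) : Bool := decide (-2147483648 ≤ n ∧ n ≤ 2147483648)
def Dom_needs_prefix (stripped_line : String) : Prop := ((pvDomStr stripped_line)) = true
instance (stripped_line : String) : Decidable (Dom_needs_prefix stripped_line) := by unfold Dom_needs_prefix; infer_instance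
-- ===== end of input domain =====

-- B replaces A's loop of startswith tests over the five rule types by a single NFA-style scan of
-- the line that narrows a set of candidate pattern suffixes character by character (objective: alternative).

-- ===== PORT A =====
def RULE_TYPES : List String := ["DOMAIN", "DOMAIN-SUFFIX", "DOMAIN-KEYWORD", "IP-CIDR", "GEOIP"]

def needs_prefix (stripped_line : String) : Bool :=
  let stripped := PySem.Str.strip stripped_line
  if stripped = "" || PySem.Str.startswith stripped "#" then false
  else if RULE_TYPES.any (fun p => PySem.Str.startswith (PySem.Str.upper stripped) (p ++ ",")) then false
  else true

-- ===== PORT B =====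
-- the `for ch in ...` loop of Source B with its two early returns, as structural recursion on the chars
def npWalk : List Char → List (List Char) → Bool
  | [], _ => true
  | ch :: rest, cands =>
    let cands' := (cands.filter (fun c => decide (c ≠ []) && (c.head? == some ch))).map (fun c => c.drop 1)
    if cands'.any (fun c => c == []) then false
    else if cands'.isEmpty then true
    else npWalk rest cands'

def needs_prefix_alt (stripped_line : String) : Bool :=
  let stripped := PySem.Str.strip stripped_line
  if stripped = "" then false
  else if PySem.Str.pyGet? stripped 0 == some '#' then false
  else npWalk (PySem.Str.upper stripped).toList (RULE_TYPES.map (fun w => (w ++ ",").toList))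

-- ===== PRECONDITION & SPEC =====
def Spec_needs_prefix (stripped_line : String) (out : Bool) : Prop := out = needs_prefix_alt stripped_line
instance (stripped_line : String) (out : Bool) : Decidable (Spec_needs_prefix stripped_line out) := by unfold Spec_needs_prefix; infer_instance

-- ===== CLAIM (what is proved, stated in full; the proofs are below) =====
def Claim_equal_needs_prefix : Prop := ∀ (stripped_line : String), Dom_needs_prefix stripped_line → Spec_needs_prefix stripped_line (needs_prefix stripped_line)

-- ===== LEMMAS AND PROOFS =====

-- the candidate-filtering scan returns false exactly when some candidate is a prefix of the input
lemma npWalk_false_iff (L : List Char) : ∀ cands : List (List Char),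
    (∀ c ∈ cands, c ≠ []) →
    (npWalk L cands = false ↔ ∃ c ∈ cands, c <+: L) := by
  induction L with
  | nil =>
    intro cands h
    simp only [npWalk, Bool.true_eq_false, false_iff]
    rintro ⟨c, hc, hpre⟩
    exact h c hc (List.prefix_nil.mp hpre)
  | cons ch rest ih =>
    intro cands h
    simp only [npWalk]
    set cands' := (cands.filter (fun c => decide (c ≠ []) && (c.head? == some ch))).map (fun c => c.drop 1) with hcs
    have mem' : ∀ c', c' ∈ cands' ↔ ∃ c ∈ cands, c.head? = some ch ∧ c.drop 1 = c' := by
      intro c'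
      simp only [hcs, List.mem_map, List.mem_filter, Bool.and_eq_true, decide_eq_true_eq, beq_iff_eq]
      constructor
      · rintro ⟨c, ⟨hc, _, hh⟩, hd⟩; exact ⟨c, hc, hh, hd⟩
      · rintro ⟨c, hc, hh, hd⟩
        exact ⟨c, ⟨hc, by rintro rfl; simp at hh, hh⟩, hd⟩
    have key : ∀ c ∈ cands, (c <+: ch :: rest ↔ c.head? = some ch ∧ c.drop 1 <+: rest) := by
      intro c hc
      cases c with
      | nil => exact absurd rfl (h [] hc)
      | cons a t => simp [List.cons_prefix_cons]
    by_cases hemp : cands'.any (fun c => c == []) = true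
    · simp only [hemp, if_true, true_iff]
      rw [List.any_eq_true] at hemp
      obtain ⟨c', hc', he⟩ := hemp
      rw [beq_iff_eq] at he; subst he
      obtain ⟨c, hc, hh, hd⟩ := (mem' []).mp hc'
      exact ⟨c, hc, (key c hc).mpr ⟨hh, by rw [hd]; exact List.nil_prefix⟩⟩
    · rw [Bool.not_eq_true] at hemp
      simp only [hemp, Bool.false_eq_true, if_false]
      by_cases hnil : cands'.isEmpty
      · simp only [hnil, if_true, Bool.true_eq_false, false_iff]
        rintro ⟨c, hc, hpre⟩
        obtain ⟨hh, hd⟩ := (key c hc).mp hpre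
        have : c.drop 1 ∈ cands' := (mem' _).mpr ⟨c, hc, hh, rfl⟩
        rw [List.isEmpty_iff] at hnil
        simp [hnil] at this
      · simp only [hnil, Bool.false_eq_true, if_false]
        have hne : ∀ c' ∈ cands', c' ≠ [] := by
          intro c' hc' he
          subst he
          rw [List.any_eq_false] at hemp
          have := hemp _ hc'
          simp at this
        rw [ih cands' hne]
        constructor
        · rintro ⟨c', hc', hpre⟩
          obtain ⟨c, hc, hh, hd⟩ := (mem' c').mp hc'
          exact ⟨c, hc, (key c hc).mpr ⟨hh, by rw [hd]; exact hpre⟩⟩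
        · rintro ⟨c, hc, hpre⟩
          obtain ⟨hh, hd⟩ := (key c hc).mp hpre
          exact ⟨c.drop 1, (mem' _).mpr ⟨c, hc, hh, rfl⟩, hd⟩

-- A's '#'-startswith test equals B's first-character test
lemma hash_guard (s : String) : PySem.Str.startswith s "#" = (PySem.Str.pyGet? s 0 == some '#') := by
  rw [Bool.eq_iff_iff]
  simp [PySem.Chars.startswith_iff]
  cases s.toList with
  | nil => simp [PySem.List.pyGet?, PySem.List.pyIdx?]
  | cons a l => simp [eq_comm]

lemma core_eq (u : String) :
    (if RULE_TYPES.any (fun p => PySem.Str.startswith u (p ++ ",")) then (false : Bool) else true)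
      = npWalk u.toList (RULE_TYPES.map (fun w => (w ++ ",").toList)) := by
  have hAll : ∀ c ∈ RULE_TYPES.map (fun w => (w ++ ",").toList), c ≠ [] := by decide
  have hiff := npWalk_false_iff u.toList _ hAll
  have hany : (RULE_TYPES.any fun p => PySem.Str.startswith u (p ++ ",")) = true ↔
      ∃ c ∈ RULE_TYPES.map (fun w => (w ++ ",").toList), c <+: u.toList := by
    rw [List.any_eq_true]
    constructor
    · rintro ⟨p, hp, hsw⟩
      rw [PySem.Str.startswith_eq, PySem.Chars.startswith_iff] at hsw
      exact ⟨(p ++ ",").toList, List.mem_map_of_mem hp, hsw⟩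
    · rintro ⟨c, hc, hpre⟩
      obtain ⟨p, hp, rfl⟩ := List.mem_map.mp hc
      exact ⟨p, hp, by rw [PySem.Str.startswith_eq, PySem.Chars.startswith_iff]; exact hpre⟩
  by_cases hA : (RULE_TYPES.any fun p => PySem.Str.startswith u (p ++ ",")) = true
  · rw [if_pos hA]
    exact (hiff.mpr (hany.mp hA)).symm
  · rw [if_neg hA]
    cases hw : npWalk u.toList (RULE_TYPES.map (fun w => (w ++ ",").toList)) with
    | false => exact absurd (hany.mpr (hiff.mp hw)) hA
    | true => rfl

theorem main_eq (sl : String) : needs_prefix sl = needs_prefix_alt sl := by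
  unfold needs_prefix needs_prefix_alt
  set st := PySem.Str.strip sl with hst
  by_cases h0 : st = ""
  · simp [h0]
  · simp only [hash_guard]
    by_cases h1 : (PySem.Str.pyGet? st 0 == some '#') = true
    · simp only [h1]
      simp [h0]
    · rw [Bool.not_eq_true] at h1
      simp only [h0, h1, decide_false, Bool.or_false, Bool.false_eq_true, if_false]
      exact core_eq (PySem.Str.upper st)

-- ===== VERDICT (by name: the statement is the Claim_ definition above) =====
theorem needs_prefix_spec : Claim_equal_needs_prefix := by
  intro sl _
  unfold Spec_needs_prefix
  exact main_eq sl
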